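-- pv_equiv track=rewrite | github.com/a-brandon/practice | codewars/find_the_order_breaker.py | order_breaker
-- ===== SOURCE A (Python) =====
-- def order_breaker(array):
--     a = array[:]
--
--     for i, n in enumerate(array):
--         x = a.pop(i)
--         if a == sorted(a):
--             return x
--         else:
--             a = array[:]
-- ===== SOURCE B (Python) =====
-- def _is_sorted_without(array, k):
--     b = array[:k] + array[k + 1:]
--     for p, q in zip(b, b[1:]):
--         if p > q:
--             return False
--     return True
--
--
-- def order_breaker(array):
--     # Only the two endpoints of the first descent can be the breaker.
--     for i, (x, y) in enumerate(zip(array, array[1:])):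
--         if x > y:
--             if _is_sorted_without(array, i):
--                 return x
--             if _is_sorted_without(array, i + 1):
--                 return y
--             return None
--     # already sorted (or empty): removing the first element keeps it sorted
--     return array[0] if array else None
-- ===== Notes on version B (the rewrite author's own statement) =====
-- stated objective: faster
-- what changed: Instead of popping every index and sorting the remainder (A), B locates the first descent with a single pass over adjacent pairs and checks only its two endpoints as removal candidates, each with a linear pairwise scan.
import Mathlib
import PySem

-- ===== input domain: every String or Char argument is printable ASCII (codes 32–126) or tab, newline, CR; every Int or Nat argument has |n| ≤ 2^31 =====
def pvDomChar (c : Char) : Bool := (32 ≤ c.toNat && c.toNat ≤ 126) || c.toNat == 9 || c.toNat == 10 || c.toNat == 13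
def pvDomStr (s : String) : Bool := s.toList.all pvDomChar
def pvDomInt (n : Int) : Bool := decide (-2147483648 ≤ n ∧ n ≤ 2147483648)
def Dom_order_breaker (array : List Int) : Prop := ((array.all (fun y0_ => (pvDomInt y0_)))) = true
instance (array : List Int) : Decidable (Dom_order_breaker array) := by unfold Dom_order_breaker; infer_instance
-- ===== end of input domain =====

-- B replaces A's try-every-index-and-sort scan by a first-descent check: only the two
-- endpoints of the first descent can be the order breaker (objective: faster, asymptotic).


-- ===== PORT A =====
-- for i, n in enumerate(array): x = a.pop(i); if a == sorted(a): return x; else a = array[:]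
-- (a is a fresh copy of array at the top of each iteration, so each step is independent)
def pvLoopA (array : List Int) : List (Int × Int) → Option Int
  | [] => none
  | (i, _n) :: rest =>
    match PySem.List.pop? array i with
    | none => none   -- unreachable: i is a valid index produced by enumerate
    | some (x, a) =>
      if a = PySem.List.sorted a (fun v => v) then some x
      else pvLoopA array rest

def order_breaker (array : List Int) : Option Int :=
  pvLoopA array (PySem.List.enumerate array)

-- ===== PORT B =====
-- b = array[:k] + array[k+1:]; for p, q in zip(b, b[1:]): if p > q: return False; return True
def pvPairsOk : List (Int × Int) → Bool
  | [] => true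
  | (p, q) :: rest => if p > q then false else pvPairsOk rest

def pvIsSortedWithout (array : List Int) (k : Int) : Bool :=
  let b := PySem.List.slice array none (some k) ++ PySem.List.slice array (some (k + 1)) none
  pvPairsOk (b.zip b.tail)

-- for i, (x, y) in enumerate(zip(array, array[1:])): …
def pvLoopB (array : List Int) : List (Int × (Int × Int)) → Option Int
  | [] =>
    -- return array[0] if array else None
    match array with
    | [] => none
    | h :: _ => some h
  | (i, (x, y)) :: rest =>
    if x > y then
      if pvIsSortedWithout array i then some x
      else if pvIsSortedWithout array (i + 1) then some y
      else none
    else pvLoopB array rest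

def order_breaker_alt (array : List Int) : Option Int :=
  pvLoopB array (PySem.List.enumerate (array.zip (PySem.List.slice array (some 1) none)))

-- ===== PRECONDITION & SPEC =====
def Spec_order_breaker (array : List Int) (out : Option Int) : Prop := out = order_breaker_alt array
instance (array : List Int) (out : Option Int) : Decidable (Spec_order_breaker array out) := by unfold Spec_order_breaker; infer_instance

-- ===== CLAIM (what is proved, stated in full; the proofs are below) =====
def Claim_equal_order_breaker : Prop := ∀ (array : List Int), Dom_order_breaker array → Spec_order_breaker array (order_breaker array)

-- ===== LEMMAS AND PROOFS =====

-- reference scan for A: try indices s, s+1, …, s+m-1; succeed on the first k with eraseIdx sorted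
def refA (array : List Int) : Nat → Nat → Option Int
  | _, 0 => none
  | s, (m+1) =>
    if (array.eraseIdx s).Pairwise (· ≤ ·) then some (array.getD s 0)
    else refA array (s+1) m

-- "a == sorted(a)" is exactly pairwise-≤
theorem pv_chk_iff (l : List Int) :
    (l = PySem.List.sorted l (fun v => v)) ↔ List.Pairwise (· ≤ ·) l := by
  constructor
  · intro h
    have := PySem.List.sorted_pairwise l (fun v => v)
    rw [← h] at this
    exact this
  · intro h
    exact (PySem.List.sorted_eq_self_of_pairwise l (fun v => v) h).symm

theorem pv_pairsOk_iff (l : List Int) :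
    pvPairsOk (l.zip l.tail) = true ↔ List.Pairwise (· ≤ ·) l := by
  rw [← List.isChain_iff_pairwise]
  induction l with
  | nil => simp [pvPairsOk]
  | cons a t ih =>
    cases t with
    | nil => simp [pvPairsOk]
    | cons b t' =>
      simp only [List.tail_cons, List.zip_cons_cons, pvPairsOk, List.isChain_cons_cons]
      by_cases hab : a > b
      · simp [hab, not_le.mpr hab]
      · have : ¬ (a > b) := hab
        simp only [if_neg this]
        rw [List.tail_cons] at ih
        constructor
        · intro h; exact ⟨not_lt.mp hab, ih.mp h⟩
        · intro h; exact ih.mpr h.2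

theorem pv_isw_iff (array : List Int) (k : Nat) :
    pvIsSortedWithout array (k : Int) = true ↔ (array.eraseIdx k).Pairwise (· ≤ ·) := by
  unfold pvIsSortedWithout
  have h1 : PySem.List.slice array none (some (k : Int)) = array.take k :=
    PySem.List.slice_to_natCast array k
  have h2 : PySem.List.slice array (some ((k : Int) + 1)) none = array.drop (k + 1) := by
    have : ((k : Int) + 1) = ((k + 1 : Nat) : Int) := by push_cast; ring
    rw [this]
    exact PySem.List.slice_from_natCast array (k + 1)
  rw [h1, h2, ← List.eraseIdx_eq_take_drop_succ]
  exact pv_pairsOk_iff _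

-- A's loop over enumerate xs s is the reference scan refA
theorem pv_loopA_eq_refA (array : List Int) (xs : List Int) (s : Nat)
    (hlen : s + xs.length ≤ array.length) :
    pvLoopA array (PySem.List.enumerate xs (s : Int)) = refA array s xs.length := by
  induction xs generalizing s with
  | nil => simp [PySem.List.enumerate_nil, pvLoopA, refA]
  | cons x xs ih =>
    rw [PySem.List.enumerate_cons]
    have hs : s < array.length := by simp at hlen; omega
    unfold pvLoopA
    rw [PySem.List.pop?_natCast array s hs]
    simp only [refA, List.length_cons]
    by_cases hp : (array.eraseIdx s).Pairwise (· ≤ ·)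
    · rw [if_pos ((pv_chk_iff _).mpr hp), if_pos hp, List.getD_eq_getElem array 0 hs]
    · rw [if_neg (fun h => hp ((pv_chk_iff _).mp h)), if_neg hp]
      have : (s : Int) + 1 = ((s + 1 : Nat) : Int) := by push_cast; ring
      rw [this]
      exact ih (s + 1) (by simp at hlen ⊢; omega)

theorem pv_refA_none (array : List Int) (m s : Nat)
    (h : ∀ k, s ≤ k → k < s + m → ¬ (array.eraseIdx k).Pairwise (· ≤ ·)) :
    refA array s m = none := by
  induction m generalizing s with
  | zero => rfl
  | succ m ih =>
    unfold refA
    rw [if_neg (h s le_rfl (by omega))]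
    exact ih (s + 1) (fun k h1 h2 => h k (by omega) (by omega))

theorem pv_refA_skip (array : List Int) (t : Nat) (s m : Nat)
    (h : ∀ k, s ≤ k → k < s + t → ¬ (array.eraseIdx k).Pairwise (· ≤ ·)) :
    refA array s (t + m) = refA array (s + t) m := by
  induction t generalizing s with
  | zero => simp
  | succ t ih =>
    have e1 : t + 1 + m = (t + m) + 1 := by omega
    rw [e1]
    simp only [refA]
    rw [if_neg (h s le_rfl (by omega))]
    rw [ih (s + 1) (fun k h1 h2 => h k (by omega) (by omega))]
    have e2 : s + 1 + t = s + (t + 1) := by omega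
    rw [e2]

-- B's loop skips enumerated non-descent pairs
theorem pv_loopB_skip (array : List Int) (ps : List (Int × Int)) (s : Int)
    (rest : List (Int × (Int × Int))) (h : ∀ p ∈ ps, p.1 ≤ p.2) :
    pvLoopB array (PySem.List.enumerate ps s ++ rest) = pvLoopB array rest := by
  induction ps generalizing s with
  | nil => rw [PySem.List.enumerate_nil]; rfl
  | cons p ps ih =>
    obtain ⟨x, y⟩ := p
    rw [PySem.List.enumerate_cons]
    have hxy : ¬ (x > y) := not_lt.mpr (h (x, y) (List.mem_cons_self))
    show pvLoopB array ((s, (x, y)) :: (PySem.List.enumerate ps (s+1) ++ rest)) = _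
    simp only [pvLoopB]
    rw [if_neg hxy]
    exact ih (s + 1) (fun p hp => h p (List.mem_cons_of_mem _ hp))

-- adjacent characterization of pairwise-≤
theorem pv_pairwise_adj (l : List Int) :
    List.Pairwise (· ≤ ·) l ↔ ∀ i (h : i + 1 < l.length), l[i] ≤ l[i+1] := by
  constructor
  · intro h i hi
    exact List.pairwise_iff_getElem.mp h i (i+1) (by omega) hi (by omega)
  · intro h
    exact List.isChain_iff_pairwise.mp (List.isChain_iff_getElem.mpr h)

-- removing an index away from a descent leaves the descent adjacent
theorem pv_not_pairwise_erase (array : List Int) (d k : Nat)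
    (hd : d + 1 < array.length)
    (hgt : array[d]'(by omega) > array[d+1]'hd)
    (hk : k < array.length) (hne : k < d ∨ d + 1 < k) :
    ¬ (array.eraseIdx k).Pairwise (· ≤ ·) := by
  intro hp
  have hlen : (array.eraseIdx k).length = array.length - 1 := by
    rw [List.length_eraseIdx]; simp [hk]
  rcases hne with hlt | hgt'
  · -- positions d-1, d in the erased list are array[d], array[d+1]
    have h1 : d - 1 + 1 < (array.eraseIdx k).length := by omega
    have := (pv_pairwise_adj _).mp hp (d - 1) h1
    rw [List.getElem_eraseIdx, List.getElem_eraseIdx] at this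
    rw [dif_neg (by omega : ¬ (d - 1 < k)), dif_neg (by omega : ¬ (d - 1 + 1 < k))] at this
    have e1 : d - 1 + 1 = d := by omega
    have e2 : d - 1 + 1 + 1 = d + 1 := by omega
    simp only [e1] at this
    omega
  · -- positions d, d+1 in the erased list are array[d], array[d+1]
    have h1 : d + 1 < (array.eraseIdx k).length := by omega
    have := (pv_pairwise_adj _).mp hp d h1
    rw [List.getElem_eraseIdx, List.getElem_eraseIdx] at this
    rw [dif_pos (by omega : d < k), dif_pos (by omega : d + 1 < k)] at this
    omega

-- ===== VERDICT (by name: the statement is the Claim_ definition above) =====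
-- B's enumerated pair list, rewritten through array.tail
theorem pv_alt_eq (array : List Int) :
    order_breaker_alt array
      = pvLoopB array (PySem.List.enumerate (array.zip array.tail) 0) := by
  unfold order_breaker_alt
  rw [PySem.List.slice_from_one]

theorem pv_zip_pair (array : List Int) (i : Nat) (hi : i < (array.zip array.tail).length) :
    (array.zip array.tail)[i]
      = (array[i]'(by simp at hi; omega),
         array[i+1]'(by simp [List.length_tail] at hi; omega)) := by
  rw [List.getElem_zip]
  congr 1
  rw [List.getElem_tail]

theorem pv_main (array : List Int) : order_breaker array = order_breaker_alt array := by
  rw [pv_alt_eq]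
  by_cases hsort : List.Pairwise (· ≤ ·) array
  · -- sorted case: B falls through its loop, A succeeds at index 0 (or array is empty)
    have hall : ∀ p ∈ array.zip array.tail, p.1 ≤ p.2 := by
      intro p hp
      obtain ⟨i, hi, he⟩ := List.mem_iff_getElem.mp hp
      rw [pv_zip_pair array i hi] at he
      subst he
      exact (pv_pairwise_adj array).mp hsort i (by simp [List.length_tail] at hi; omega)
    have hb := pv_loopB_skip array (array.zip array.tail) 0 [] hall
    rw [List.append_nil] at hb
    rw [hb]
    cases array with
    | nil => rfl
    | cons h t =>
      show order_breaker (h :: t) = some h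
      unfold order_breaker
      rw [PySem.List.enumerate_cons]
      simp only [pvLoopA, PySem.List.pop?_zero_cons]
      rw [if_pos ((pv_chk_iff t).mpr (List.Pairwise.of_cons hsort))]
  · -- descent case: let d be the first descent
    have hex : ∃ i, i + 1 < array.length ∧
        array.getD i 0 > array.getD (i+1) 0 := by
      have hadj := (not_iff_not.mpr (pv_pairwise_adj array)).mp hsort
      push Not at hadj
      obtain ⟨i, hi, hgt⟩ := hadj
      exact ⟨i, hi, by rw [List.getD_eq_getElem array 0 (by omega),
        List.getD_eq_getElem array 0 hi]; omega⟩
    classical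
    obtain ⟨d, hd, hmin⟩ : ∃ d, (d + 1 < array.length ∧
          array.getD d 0 > array.getD (d+1) 0) ∧
        ∀ j, j < d → ¬ (j + 1 < array.length ∧ array.getD j 0 > array.getD (j+1) 0) :=
      ⟨Nat.find hex, Nat.find_spec hex, fun j hj => Nat.find_min hex hj⟩
    have hd1 : d + 1 < array.length := hd.1
    have hgt : array[d]'(by omega) > array[d+1]'hd1 := by
      have := hd.2
      rwa [List.getD_eq_getElem array 0 (by omega), List.getD_eq_getElem array 0 hd1] at this
    have hle : ∀ (j : Nat) (hj : j < d), array[j]'(by omega) ≤ array[j+1]'(by omega) := by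
      intro j hj
      have hj1 : j + 1 < array.length := by omega
      have := hmin j hj
      rw [not_and] at this
      have := this hj1
      rw [List.getD_eq_getElem array 0 (by omega), List.getD_eq_getElem array 0 hj1] at this
      omega
    -- A side: refA evaluation
    have hA : order_breaker array = refA array d (array.length - d) := by
      unfold order_breaker
      have h0 := pv_loopA_eq_refA array array 0 (by omega)
      rw [Nat.cast_zero] at h0
      rw [h0]
      have hs2 := pv_refA_skip array d 0 (array.length - d)
        (fun k _ hk => pv_not_pairwise_erase array d k hd1 hgt (by omega) (Or.inl (by omega)))
      rw [Nat.zero_add] at hs2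
      have e : d + (array.length - d) = array.length := by omega
      rw [e] at hs2
      exact hs2
    obtain ⟨m', hm'⟩ : ∃ m', array.length - d = m' + 2 := ⟨array.length - d - 2, by omega⟩
    rw [hA, hm']
    simp only [refA]
    rw [pv_refA_none array m' (d + 1 + 1)
      (fun k hk1 hk2 => pv_not_pairwise_erase array d k hd1 hgt (by omega) (Or.inr (by omega)))]
    -- B side
    have lp : (array.zip array.tail).length = array.length - 1 := by
      simp [List.length_tail]
    have hdp : d < (array.zip array.tail).length := by omega
    have hBsplit : array.zip array.tail
        = (array.zip array.tail).take d ++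
          ((array.zip array.tail)[d] :: (array.zip array.tail).drop (d+1)) := by
      rw [← List.drop_eq_getElem_cons hdp, List.take_append_drop]
    rw [hBsplit, PySem.List.enumerate_append]
    have htk : ∀ p ∈ (array.zip array.tail).take d, p.1 ≤ p.2 := by
      intro p hp
      obtain ⟨i, hi, he⟩ := List.mem_iff_getElem.mp hp
      have hid : i < d := by simp at hi; omega
      rw [List.getElem_take, pv_zip_pair array i (by omega)] at he
      subst he
      exact hle i hid
    rw [pv_loopB_skip array _ 0 _ htk]
    have hlen_take : ((array.zip array.tail).take d).length = d := by
      simp; omega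
    rw [hlen_take, PySem.List.enumerate_cons, pv_zip_pair array d hdp]
    simp only [pvLoopB]
    rw [if_pos hgt]
    simp only [zero_add]
    -- align the two conditional chains
    by_cases h1 : (array.eraseIdx d).Pairwise (· ≤ ·)
    · rw [if_pos h1, if_pos ((pv_isw_iff array d).mpr h1),
        List.getD_eq_getElem array 0 (by omega)]
    · rw [if_neg h1, if_neg (fun h => h1 ((pv_isw_iff array d).mp h))]
      have hc : (d : Int) + 1 = ((d + 1 : Nat) : Int) := by push_cast; ring
      rw [hc]
      by_cases h2 : (array.eraseIdx (d+1)).Pairwise (· ≤ ·)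
      · rw [if_pos h2, if_pos ((pv_isw_iff array (d+1)).mpr h2),
          List.getD_eq_getElem array 0 hd1]
      · rw [if_neg h2, if_neg (fun h => h2 ((pv_isw_iff array (d+1)).mp h))]

-- ===== VERDICT (by name: the statement is the Claim_ definition above) =====
theorem order_breaker_spec : Claim_equal_order_breaker := by
  intro array _
  unfold Spec_order_breaker
  exact pv_main array
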